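-- pv_equiv track=rewrite | github.com/zhaoyunmuyu/CoPaw | src/swe/app/middleware/tenant_identity.py | _is_valid_tenant_id
-- ===== SOURCE A (Python) =====
-- def _is_valid_tenant_id(tenant_id: str) -> bool:
--     """Validate tenant ID format.
--
--     Args:
--         tenant_id: The tenant ID to validate.
--
--     Returns:
--         True if valid, False otherwise.
--     """
--     if not tenant_id:
--         return False
--
--     # Basic validation: not empty, reasonable length, no path traversal
--     if len(tenant_id) < 1 or len(tenant_id) > 256:
--         return False
--
--     # Disallow path traversal characters
--     if ".." in tenant_id or "/" in tenant_id or "\\" in tenant_id: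
--         return False
--
--     # Disallow control characters
--     if any(ord(c) < 32 for c in tenant_id):
--         return False
--
--     return True
-- ===== SOURCE B (Python) =====
-- def _is_valid_tenant_id(tenant_id: str) -> bool:
--     """Single-pass validation: length check, then one scan tracking the previous
--     character to reject control chars, path separators and consecutive dots."""
--     if not (1 <= len(tenant_id) <= 256):
--         return False
--     prev = ''
--     for c in tenant_id:
--         if ord(c) < 32 or c == '/' or c == '\\' or (c == '.' and prev == '.'):
--             return False
--         prev = c
--     return True
-- ===== Notes on version B (the rewrite author's own statement) =====
-- stated objective: alternative
-- what changed: Replaced A's four separate passes (emptiness, length, three substring scans, a control-character scan) with a single left-to-right scan that tracks the previous character to detect consecutive dots on the fly.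
import Mathlib
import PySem

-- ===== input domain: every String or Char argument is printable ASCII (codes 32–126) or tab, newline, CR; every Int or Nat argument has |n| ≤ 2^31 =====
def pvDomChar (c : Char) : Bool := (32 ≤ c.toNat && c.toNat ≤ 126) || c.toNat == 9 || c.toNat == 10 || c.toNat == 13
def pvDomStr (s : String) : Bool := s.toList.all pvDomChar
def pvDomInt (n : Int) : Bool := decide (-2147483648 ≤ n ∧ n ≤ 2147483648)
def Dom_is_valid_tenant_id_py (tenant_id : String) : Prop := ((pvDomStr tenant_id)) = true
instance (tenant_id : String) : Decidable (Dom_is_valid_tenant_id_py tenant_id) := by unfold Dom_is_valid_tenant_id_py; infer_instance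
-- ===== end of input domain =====

-- ===== PORT A =====
-- Header: B replaces A's four separate passes with a single scan tracking the
-- previous character; genuinely different traversal, same return value (alternative).
def is_valid_tenant_id_py (tenant_id : String) : Bool :=
  -- if not tenant_id: return False
  if PySem.Str.len tenant_id == 0 then false
  -- if len(tenant_id) < 1 or len(tenant_id) > 256: return False
  else if PySem.Str.len tenant_id < 1 || PySem.Str.len tenant_id > 256 then false
  -- if ".." in tenant_id or "/" in tenant_id or "\\" in tenant_id: return False
  else if PySem.Str.isIn ".." tenant_id || PySem.Str.isIn "/" tenant_id
          || PySem.Str.isIn "\\" tenant_id then false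
  -- if any(ord(c) < 32 for c in tenant_id): return False
  else if tenant_id.toList.any (fun c => decide (c.toNat < 32)) then false
  else true

-- ===== PORT B =====
-- the for-loop of Source B: prev = '' then scan; early return False becomes `false`
def pvAltLoop (cs : List Char) (prev : Option Char) : Bool :=
  match cs with
  | [] => true
  | c :: rest =>
    if decide (c.toNat < 32) || c == '/' || c == '\\' || (c == '.' && prev == some '.') then
      false
    else
      pvAltLoop rest (some c)

def is_valid_tenant_id_py_alt (tenant_id : String) : Bool :=
  if 1 ≤ tenant_id.toList.length && tenant_id.toList.length ≤ 256 then
    pvAltLoop tenant_id.toList none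
  else
    false

-- ===== PRECONDITION & SPEC =====
def Spec_is_valid_tenant_id_py (tenant_id : String) (out : Bool) : Prop := out = is_valid_tenant_id_py_alt tenant_id
instance (tenant_id : String) (out : Bool) : Decidable (Spec_is_valid_tenant_id_py tenant_id out) := by unfold Spec_is_valid_tenant_id_py; infer_instance

-- ===== CLAIM (what is proved, stated in full; the proofs are below) =====
def Claim_equal_is_valid_tenant_id_py : Prop := ∀ (tenant_id : String), Dom_is_valid_tenant_id_py tenant_id → Spec_is_valid_tenant_id_py tenant_id (is_valid_tenant_id_py tenant_id)

-- ===== LEMMAS AND PROOFS =====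

lemma pvDDPrefix (rest : List Char) (c : Char) :
    (['.', '.'] <+: c :: rest) ↔ (c = '.' ∧ rest.head? = some '.') := by
  cases rest <;> simp [List.cons_prefix_cons, eq_comm]

-- the only fact specific to our two programs: B's single scan succeeds iff no
-- character is bad, no two consecutive dots occur, and the carried previous
-- character does not form ".." with the first character
lemma pvAltLoop_iff (cs : List Char) (p : Option Char) :
    pvAltLoop cs p = true ↔
      (∀ c ∈ cs, ¬ (c.toNat < 32 ∨ c = '/' ∨ c = '\\')) ∧
      ¬ ['.', '.'] <:+: cs ∧ ¬ (p = some '.' ∧ cs.head? = some '.') := by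
  induction cs generalizing p with
  | nil => simp [pvAltLoop]
  | cons c rest ih =>
    rw [pvAltLoop, List.infix_cons_iff, pvDDPrefix]
    split_ifs with hbad
    · simp only [false_iff]
      simp only [Bool.or_eq_true, decide_eq_true_eq, beq_iff_eq, Bool.and_eq_true] at hbad
      rintro ⟨hall, hdd, hp⟩
      rcases hbad with ((h | h) | h) | ⟨h1, h2⟩
      · exact hall c (by simp) (Or.inl h)
      · exact hall c (by simp) (Or.inr (Or.inl h))
      · exact hall c (by simp) (Or.inr (Or.inr h))
      · exact hp ⟨h2, by simp [h1]⟩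
    · rw [ih]
      simp only [Bool.or_eq_true, decide_eq_true_eq, beq_iff_eq, Bool.and_eq_true,
        not_or] at hbad
      obtain ⟨⟨⟨h32, hsl⟩, hbs⟩, hdot⟩ := hbad
      constructor
      · rintro ⟨hallr, hddr, hpr⟩
        refine ⟨?_, ?_, ?_⟩
        · intro x hx
          rcases List.mem_cons.mp hx with rfl | hx
          · rintro (h | h | h)
            exacts [h32 h, hsl h, hbs h]
          · exact hallr x hx
        · rintro (⟨h1, h2⟩ | h)
          · exact hpr ⟨by rw [h1], h2⟩
          · exact hddr h
        · rintro ⟨hp', hc⟩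
          simp only [List.head?_cons, Option.some.injEq] at hc
          exact hdot ⟨hc, hp'⟩
      · rintro ⟨hall, hdd2, hp⟩
        refine ⟨fun x hx => hall x (List.mem_cons_of_mem _ hx),
                fun h => hdd2 (Or.inr h), ?_⟩
        rintro ⟨hc, h2⟩
        simp only [Option.some.injEq] at hc
        exact hdd2 (Or.inl ⟨hc, h2⟩)

-- the two port bodies agree, stated over the underlying character list
lemma pvMain (cs : List Char) :
    (if ((cs.length : Int) == 0) = true then false
     else if (decide ((cs.length : Int) < 1) || decide ((cs.length : Int) > 256)) = true then false
     else if (PySem.Chars.isIn ['.', '.'] cs || PySem.Chars.isIn ['/'] cs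
              || PySem.Chars.isIn ['\\'] cs) = true then false
     else if (cs.any fun c => decide (c.toNat < 32)) = true then false
     else true) =
    (if (decide (1 ≤ cs.length) && decide (cs.length ≤ 256)) = true then pvAltLoop cs none
     else false) := by
  by_cases hlen : 1 ≤ cs.length ∧ cs.length ≤ 256
  · have h0 : ((cs.length : Int) == 0) = false := by
      simp only [beq_eq_false_iff_ne, ne_eq]; omega
    have h1 : (decide ((cs.length : Int) < 1) || decide ((cs.length : Int) > 256)) = false := by
      simp only [Bool.or_eq_false_iff, decide_eq_false_iff_not, not_lt, gt_iff_lt]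
      omega
    have hb : (decide (1 ≤ cs.length) && decide (cs.length ≤ 256)) = true := by
      simp only [Bool.and_eq_true, decide_eq_true_eq]; exact hlen
    rw [h0, h1, hb]
    simp only [Bool.false_eq_true, if_false, if_true]
    by_cases hgood : (PySem.Chars.isIn ['.', '.'] cs || PySem.Chars.isIn ['/'] cs
        || PySem.Chars.isIn ['\\'] cs) = true
        ∨ (cs.any (fun c => decide (c.toNat < 32))) = true
    · have hfalse : pvAltLoop cs none = false := by
        rw [Bool.eq_false_iff, ne_eq, pvAltLoop_iff]
        rintro ⟨hall, hdd, -⟩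
        rcases hgood with h | h
        · simp only [Bool.or_eq_true, PySem.Chars.isIn_iff_infix] at h
          rcases h with (h | h) | h
          · exact hdd h
          · exact hall _ ((List.singleton_infix_iff _ _).mp h) (Or.inr (Or.inl rfl))
          · exact hall _ ((List.singleton_infix_iff _ _).mp h) (Or.inr (Or.inr rfl))
        · simp only [List.any_eq_true, decide_eq_true_eq] at h
          obtain ⟨c, hc, h32⟩ := h
          exact hall c hc (Or.inl h32)
      rw [hfalse]
      rcases hgood with h | h
      · rw [h]; simp
      · by_cases h2 : (PySem.Chars.isIn ['.', '.'] cs || PySem.Chars.isIn ['/'] cs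
            || PySem.Chars.isIn ['\\'] cs) = true
        · rw [h2]; simp
        · rw [Bool.not_eq_true] at h2
          rw [h2, h]
          simp
    · push Not at hgood
      obtain ⟨hsub, hctl⟩ := hgood
      simp only [ne_eq, Bool.not_eq_true] at hsub hctl
      rw [hsub, hctl]
      simp only [Bool.false_eq_true, if_false]
      symm
      rw [pvAltLoop_iff]
      simp only [Bool.or_eq_false_iff, PySem.Chars.isIn_eq_false_iff] at hsub
      refine ⟨?_, ?_, by simp⟩
      · intro c hc
        rintro (h | h | h)
        · rw [List.any_eq_false] at hctl
          exact absurd (by simpa using hctl c hc) (by simpa using h)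
        · exact hsub.1.2 (by subst h; exact (List.singleton_infix_iff _ _).mpr hc)
        · exact hsub.2 (by subst h; exact (List.singleton_infix_iff _ _).mpr hc)
      · exact hsub.1.1
  · have hb : (decide (1 ≤ cs.length) && decide (cs.length ≤ 256)) = false := by
      simp only [Bool.and_eq_false_iff, decide_eq_false_iff_not, not_le]
      omega
    rw [hb]
    simp only [Bool.false_eq_true, if_false]
    by_cases h0 : cs.length = 0
    · have : ((cs.length : Int) == 0) = true := by simp [h0]
      rw [this]
      simp
    · have hgt : 256 < cs.length := by omega
      have hz : ((cs.length : Int) == 0) = false := by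
        simp only [beq_eq_false_iff_ne, ne_eq]; omega
      rw [hz]
      have ho : (decide ((cs.length : Int) < 1) || decide ((cs.length : Int) > 256)) = true := by
        simp only [Bool.or_eq_true, decide_eq_true_eq, gt_iff_lt]
        right; exact_mod_cast hgt
      rw [ho]
      simp

-- ===== VERDICT (by name: the statement is the Claim_ definition above) =====
theorem is_valid_tenant_id_py_spec : Claim_equal_is_valid_tenant_id_py := by
  intro s _
  show is_valid_tenant_id_py s = is_valid_tenant_id_py_alt s
  unfold is_valid_tenant_id_py is_valid_tenant_id_py_alt
  simp only [PySem.Str.len_eq, PySem.Str.isIn_eq]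
  have e1 : (".." : String).toList = ['.', '.'] := rfl
  have e2 : ("/" : String).toList = ['/'] := rfl
  have e3 : ("\\" : String).toList = ['\\'] := rfl
  simp only [e1, e2, e3]
  exact pvMain s.toList
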